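-- pv_equiv track=rewrite | github.com/JajnaseniMajhi/DSAPython | Searching/SpecialInteger.py | checkForWindowSize
-- ===== SOURCE A (Python) =====
-- def checkForWindowSize(A,B,K):
--     subArraySum=0
--     for i in range(K):
--         subArraySum=subArraySum+A[i]
--
--     if subArraySum>B:
--         return False
--
--     for j in range(K,len(A)):
--         subArraySum=subArraySum-A[j-K]
--         subArraySum=subArraySum+A[j]
--         if subArraySum>B:
--             return False
--     return True
-- ===== SOURCE B (Python) =====
-- def checkForWindowSize(A, B, K):
--     prefix = [0]
--     for x in A:
--         prefix.append(prefix[-1] + x)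
--     n = len(A)
--     for j in range(K, n + 1):
--         if prefix[j] - prefix[j - K] > B:
--             return False
--     return True
-- ===== Notes on version B (the rewrite author's own statement) =====
-- stated objective: alternative
-- what changed: Replaces the incremental sliding-window sum (subtract the leaving element, add the entering one) with a prefix-sum table built in one pass and a separate pass checking each window as a difference of two table entries.
-- outside the precondition, e.g. on checkForWindowSize([1], -1, -3): A returns False, B raises IndexError; on checkForWindowSize([0, 10], 2, -1): A returns False, B returns False
import Mathlib
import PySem

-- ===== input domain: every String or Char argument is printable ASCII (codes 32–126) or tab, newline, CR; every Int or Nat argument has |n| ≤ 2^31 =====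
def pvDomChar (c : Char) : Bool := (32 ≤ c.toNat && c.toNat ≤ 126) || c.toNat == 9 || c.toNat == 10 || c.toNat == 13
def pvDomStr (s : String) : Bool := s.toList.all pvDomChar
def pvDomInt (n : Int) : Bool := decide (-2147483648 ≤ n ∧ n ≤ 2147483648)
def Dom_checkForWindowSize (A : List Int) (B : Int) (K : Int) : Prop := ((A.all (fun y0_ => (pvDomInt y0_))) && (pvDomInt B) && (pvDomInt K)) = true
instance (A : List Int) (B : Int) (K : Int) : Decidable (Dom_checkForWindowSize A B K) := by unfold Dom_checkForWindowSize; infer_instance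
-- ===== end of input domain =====

-- B replaces A's incremental sliding-window update with a prefix-sum table queried in a
-- separate pass (alternative decomposition, same O(n) cost).

-- ===== PORT A =====
-- A's first loop: sum of A[0..K)
def pvFirstSum (A : List Int) (K : Int) : Int :=
  (PySem.List.pyRange 0 K 1).foldl (fun s i => s + PySem.List.pyGetD A i 0) 0

-- A's second loop: update the running sum, bail out on a violating window
def pvALoop (A : List Int) (B : Int) (K : Int) : List Int → Int → Bool
  | [], _ => true
  | j :: rest, s =>
      let s' := s - PySem.List.pyGetD A (j - K) 0 + PySem.List.pyGetD A j 0
      if s' > B then false else pvALoop A B K rest s'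

def checkForWindowSize (A : List Int) (B : Int) (K : Int) : Bool :=
  if pvFirstSum A K > B then false
  else pvALoop A B K (PySem.List.pyRange K (A.length : Int) 1) (pvFirstSum A K)

-- ===== PORT B =====
-- B's first loop: build the prefix-sum table (prefix.append(prefix[-1] + x))
def pvPrefix (A : List Int) : List Int :=
  A.foldl (fun p x => p ++ [PySem.List.pyGetD p (-1) 0 + x]) [0]

-- B's second loop: check each window as a difference of two table entries
def pvBLoop (pfx : List Int) (B : Int) (K : Int) : List Int → Bool
  | [] => true
  | j :: rest =>
      if PySem.List.pyGetD pfx j 0 - PySem.List.pyGetD pfx (j - K) 0 > B then false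
      else pvBLoop pfx B K rest

def checkForWindowSize_alt (A : List Int) (B : Int) (K : Int) : Bool :=
  pvBLoop (pvPrefix A) B K (PySem.List.pyRange K ((A.length : Int) + 1) 1)

-- ===== PRECONDITION & SPEC =====
-- Pre_ restricts to the natural domain of a window size: 0 ≤ K ≤ len(A).  For K > len(A)
-- A always raises IndexError in its first loop; for K < 0 (a nonsensical negative window
-- size) A relies on Python's negative-index wraparound and raises IndexError on most such
-- inputs, returning False only on the rest.
def Pre_checkForWindowSize (A : List Int) (B : Int) (K : Int) : Prop :=
  0 ≤ K ∧ K ≤ (A.length : Int)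
instance (A : List Int) (B : Int) (K : Int) : Decidable (Pre_checkForWindowSize A B K) := by
  unfold Pre_checkForWindowSize; infer_instance

def pvWitness_checkForWindowSize : List Int × Int × Int := ([1, 2, 3, 4], 5, 2)

def Spec_checkForWindowSize (A : List Int) (B : Int) (K : Int) (out : Bool) : Prop := out = checkForWindowSize_alt A B K
instance (A : List Int) (B : Int) (K : Int) (out : Bool) : Decidable (Spec_checkForWindowSize A B K out) := by unfold Spec_checkForWindowSize; infer_instance

-- ===== CLAIM (what is proved, stated in full; the proofs are below) =====
def Claim_equal_checkForWindowSize : Prop := ∀ (A : List Int) (B : Int) (K : Int), Dom_checkForWindowSize A B K → Pre_checkForWindowSize A B K → Spec_checkForWindowSize A B K (checkForWindowSize A B K)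

-- ===== LEMMAS AND PROOFS =====

-- the prefix-sum table B builds, in closed recursive form
def psums (s : Int) : List Int → List Int
  | [] => [s]
  | x :: xs => s :: psums (s + x) xs

theorem length_psums (s : Int) (A : List Int) : (psums s A).length = A.length + 1 := by
  induction A generalizing s with
  | nil => simp [psums]
  | cons x xs ih => simp [psums, ih]

theorem foldl_psums (A : List Int) : ∀ (q : List Int) (s : Int),
    A.foldl (fun p x => p ++ [PySem.List.pyGetD p (-1) 0 + x]) (q ++ [s]) = q ++ psums s A := by
  induction A with
  | nil => intro q s; simp [psums]
  | cons x xs ih =>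
      intro q s
      simp only [List.foldl_cons, PySem.List.pyGetD_neg_one_append_singleton]
      have := ih (q ++ [s]) (s + x)
      simpa [psums] using this

theorem pvPrefix_eq (A : List Int) : pvPrefix A = psums 0 A := by
  simpa [pvPrefix] using foldl_psums A [] 0

theorem psums_getElem_take (A : List Int) : ∀ (s : Int) (i : Nat) (h : i ≤ A.length),
    (psums s A)[i]'(by rw [length_psums]; omega) = s + (A.take i).sum := by
  induction A with
  | nil =>
      intro s i h
      simp only [List.length_nil, Nat.le_zero] at h
      subst h; simp [psums]
  | cons x xs ih =>
      intro s i h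
      cases i with
      | zero => simp [psums]
      | succ i' =>
          simp only [psums, List.getElem_cons_succ, List.take_succ_cons, List.sum_cons]
          rw [ih (s + x) i' (by simpa using h)]
          ring

-- pyGetD on the table, for a nonnegative in-range Int index
theorem pyGetD_psums (A : List Int) (j : Int) (h0 : 0 ≤ j) (h1 : j ≤ (A.length : Int)) :
    PySem.List.pyGetD (psums 0 A) j 0 = (A.take j.toNat).sum := by
  rw [PySem.List.pyGetD_eq_getElem (psums 0 A) 0 h0 (by rw [length_psums]; push_cast; omega)]
  rw [psums_getElem_take A 0 j.toNat (by omega)]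
  ring

-- one step of the table: pfx[i+1] = pfx[i] + A[i]
theorem pyGetD_psums_step (A : List Int) (i : Int) (h0 : 0 ≤ i) (h1 : i < (A.length : Int)) :
    PySem.List.pyGetD (psums 0 A) (i + 1) 0
      = PySem.List.pyGetD (psums 0 A) i 0 + PySem.List.pyGetD A i 0 := by
  rw [pyGetD_psums A i h0 (by omega), pyGetD_psums A (i + 1) (by omega) (by omega)]
  rw [PySem.List.pyGetD_eq_getElem A 0 h0 (by omega)]
  have htn : (i + 1).toNat = i.toNat + 1 := by omega
  rw [htn, List.sum_take_succ A i.toNat (by omega)]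

-- A's first loop computes the K-th prefix sum
theorem firstLoop_sum (A : List Int) : ∀ (k : Nat), k ≤ A.length →
    pvFirstSum A (k : Int) = (A.take k).sum := by
  intro k
  induction k with
  | zero => intro _; simp [pvFirstSum, PySem.List.pyRange_one_eq_nil]
  | succ k' ih =>
      intro h
      have hcast : ((k' + 1 : Nat) : Int) = (k' : Int) + 1 := by push_cast; ring
      unfold pvFirstSum at *
      rw [hcast, PySem.List.pyRange_one_succ_right (by omega : (0:Int) ≤ (k' : Int)), List.foldl_append,
        ih (by omega)]
      simp only [List.foldl_cons, List.foldl_nil]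
      rw [PySem.List.pyGetD_eq_getElem A 0 (by omega) (by omega)]
      rw [List.sum_take_succ A k' (by omega)]
      simp

-- the two second loops agree, given the running-sum / table-difference invariant
theorem loops_eq (A : List Int) (B K : Int) (hK0 : 0 ≤ K) : ∀ (m : Nat) (j : Int),
    K ≤ j → j + m = (A.length : Int) →
    pvALoop A B K (PySem.List.pyRange j (A.length : Int) 1)
        (PySem.List.pyGetD (psums 0 A) j 0 - PySem.List.pyGetD (psums 0 A) (j - K) 0)
      = pvBLoop (psums 0 A) B K (PySem.List.pyRange (j + 1) ((A.length : Int) + 1) 1) := by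
  intro m
  induction m with
  | zero =>
      intro j hKj hjn
      have hj : j = (A.length : Int) := by omega
      subst hj
      rw [PySem.List.pyRange_one_eq_nil (by omega), PySem.List.pyRange_one_eq_nil (by omega)]
      rfl
  | succ m' ih =>
      intro j hKj hjn
      have hjlt : j < (A.length : Int) := by omega
      rw [PySem.List.pyRange_one_cons hjlt,
          PySem.List.pyRange_one_cons (show j + 1 < (A.length : Int) + 1 by omega)]
      have hstep :
          PySem.List.pyGetD (psums 0 A) j 0 - PySem.List.pyGetD (psums 0 A) (j - K) 0
              - PySem.List.pyGetD A (j - K) 0 + PySem.List.pyGetD A j 0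
            = PySem.List.pyGetD (psums 0 A) (j + 1) 0
              - PySem.List.pyGetD (psums 0 A) (j + 1 - K) 0 := by
        rw [pyGetD_psums_step A j (by omega) hjlt]
        have h2 : j + 1 - K = (j - K) + 1 := by ring
        rw [h2, pyGetD_psums_step A (j - K) (by omega) (by omega)]
        ring
      show (if _ > B then false else _) = (if _ > B then false else _)
      simp only [hstep]
      by_cases h : PySem.List.pyGetD (psums 0 A) (j + 1) 0
          - PySem.List.pyGetD (psums 0 A) (j + 1 - K) 0 > B
      · simp [h]
      · simp only [if_neg h]
        exact ih (j + 1) (by omega) (by omega)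

-- ===== VERDICT (by name: the statement is the Claim_ definition above) =====
theorem checkForWindowSize_spec : Claim_equal_checkForWindowSize := by
  intro A B K _ hPre
  obtain ⟨hK0, hKn⟩ := hPre
  unfold Spec_checkForWindowSize checkForWindowSize checkForWindowSize_alt
  rw [pvPrefix_eq]
  have hs0 : pvFirstSum A K
      = PySem.List.pyGetD (psums 0 A) K 0 - PySem.List.pyGetD (psums 0 A) 0 0 := by
    rw [pyGetD_psums A K hK0 hKn, pyGetD_psums A 0 (le_refl _) (by omega)]
    have hKk : K = (K.toNat : Int) := by omega
    rw [hKk, firstLoop_sum A K.toNat (by omega)]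
    have hmx : (max K 0).toNat = K.toNat := by omega
    simp [hmx]
  rw [hs0]
  rw [PySem.List.pyRange_one_cons (show K < (A.length : Int) + 1 by omega)]
  simp only [pvBLoop, sub_self]
  by_cases h : PySem.List.pyGetD (psums 0 A) K 0 - PySem.List.pyGetD (psums 0 A) 0 0 > B
  · simp [h]
  · simp only [if_neg h]
    have := loops_eq A B K hK0 ((A.length : Int) - K).toNat K (le_refl _) (by omega)
    rw [sub_self] at this
    exact this
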